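-- pv_equiv track=rewrite | github.com/metalnino/JioziWXBot | wxbot_core.py | new_msg_get_plus
-- ===== SOURCE A (Python) =====
-- def new_msg_get_plus(chat_records):
--     """
--     从聊天记录中过滤出"上一条自己发送消息之后"的新消息：
--     1. 过滤掉 SYS 与 Recall 类型消息（保留 Time 消息）
--     2. 若存在 Self 消息：定位最新 Self 消息，取其后的记录；
--        若后续有 Time 消息，则取最新 Time 消息之后的对方消息。
--     3. 若无 Self 消息：定位最新 Time 消息，取其后的对方消息；
--        若也无 Time 消息，返回全部过滤后的消息。
--
--     :param chat_records: wx.GetAllMessage() 返回的消息列表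
--     :return:             过滤后的新消息列表
--     """
--     # 步骤1：过滤掉 SYS 与 Recall 消息
--     filtered = [msg for msg in chat_records if msg[0] not in ("SYS", "Recall")]
--
--     if any(msg[0] == "Self" for msg in filtered):
--         # 找到最新 Self 消息的索引（最后一次出现）
--         latest_self_index = None
--         for idx, msg in enumerate(filtered):
--             if msg[0] == "Self":
--                 latest_self_index = idx
--         post_self = filtered[latest_self_index + 1:]
--
--         # 在 Self 之后查找最新 Time 消息
--         latest_time_index = None
--         for idx, msg in enumerate(post_self):
--             if msg[0] == "Time":
--                 latest_time_index = idx
--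
--         if latest_time_index is not None:
--             post_time = post_self[latest_time_index + 1:]
--             return [msg for msg in post_time if msg[0] not in ("Self", "Time")]
--         else:
--             return post_self
--     else:
--         # 无 Self 消息，直接查找最新 Time 消息
--         latest_time_index = None
--         for idx, msg in enumerate(filtered):
--             if msg[0] == "Time":
--                 latest_time_index = idx
--
--         if latest_time_index is not None:
--             post_time = filtered[latest_time_index + 1:]
--             return [msg for msg in post_time if msg[0] not in ("Self", "Time")]
--         else:
--             return filtered
-- ===== SOURCE B (Python) =====
-- def new_msg_get_plus(chat_records):
--     filtered = [msg for msg in chat_records if msg[0] not in ("SYS", "Recall")]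
--     cut = -1
--     for idx, msg in enumerate(filtered):
--         if msg[0] in ("Self", "Time"):
--             cut = idx
--     return [msg for msg in filtered[cut + 1:] if msg[0] not in ("Self", "Time")]
-- ===== Notes on version B (the rewrite author's own statement) =====
-- stated objective: simpler
-- what changed: Replaces A's four nested Self/Time branches (an any-scan, a last-Self loop, a slice, then a last-Time loop and another branch) by a single pass that records the last index of any Self-or-Time message (cut, default -1) and returns filtered[cut+1:] with Self/Time messages dropped.
import Mathlib
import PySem

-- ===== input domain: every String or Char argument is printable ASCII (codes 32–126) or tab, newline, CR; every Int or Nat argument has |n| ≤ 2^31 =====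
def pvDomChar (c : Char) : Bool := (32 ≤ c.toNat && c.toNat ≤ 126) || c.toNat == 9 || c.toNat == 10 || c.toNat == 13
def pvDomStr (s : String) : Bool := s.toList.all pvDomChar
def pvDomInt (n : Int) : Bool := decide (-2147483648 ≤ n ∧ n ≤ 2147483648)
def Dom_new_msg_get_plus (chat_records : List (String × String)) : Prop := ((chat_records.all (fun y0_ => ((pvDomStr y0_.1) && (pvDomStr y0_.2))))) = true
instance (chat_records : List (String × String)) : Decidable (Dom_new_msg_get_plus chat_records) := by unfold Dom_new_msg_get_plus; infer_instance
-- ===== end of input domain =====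

-- B replaces A's four nested Self/Time branches by one cut-point (last Self-or-Time index) pass: simpler.


-- ===== PORT A =====
def new_msg_get_plus (chat_records : List (String × String)) : List (String × String) :=
  -- filtered = [msg for msg in chat_records if msg[0] not in ("SYS", "Recall")]
  let filtered := chat_records.filter (fun msg => !(msg.1 == "SYS" || msg.1 == "Recall"))
  if filtered.any (fun msg => msg.1 == "Self") then
    -- for idx, msg in enumerate(filtered): if msg[0] == "Self": latest_self_index = idx
    let latest_self_index : Option Int :=
      (PySem.List.enumerate filtered 0).foldl
        (fun acc q => if q.2.1 == "Self" then some q.1 else acc) none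
    match latest_self_index with
    | none => []   -- unreachable: the 'any' guard guarantees a Self index (Python would raise TypeError on None + 1)
    | some i =>
      let post_self := PySem.List.slice filtered (some (i + 1)) none
      let latest_time_index : Option Int :=
        (PySem.List.enumerate post_self 0).foldl
          (fun acc q => if q.2.1 == "Time" then some q.1 else acc) none
      match latest_time_index with
      | some t =>
        let post_time := PySem.List.slice post_self (some (t + 1)) none
        post_time.filter (fun msg => !(msg.1 == "Self" || msg.1 == "Time"))
      | none => post_self
  else
    let latest_time_index : Option Int :=
      (PySem.List.enumerate filtered 0).foldl
        (fun acc q => if q.2.1 == "Time" then some q.1 else acc) none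
    match latest_time_index with
    | some t =>
      let post_time := PySem.List.slice filtered (some (t + 1)) none
      post_time.filter (fun msg => !(msg.1 == "Self" || msg.1 == "Time"))
    | none => filtered

-- ===== PORT B =====
def new_msg_get_plus_alt (chat_records : List (String × String)) : List (String × String) :=
  let filtered := chat_records.filter (fun msg => !(msg.1 == "SYS" || msg.1 == "Recall"))
  -- cut = -1; for idx, msg in enumerate(filtered): if msg[0] in ("Self","Time"): cut = idx
  let cut : Int :=
    (PySem.List.enumerate filtered 0).foldl
      (fun c q => if q.2.1 == "Self" || q.2.1 == "Time" then q.1 else c) (-1)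
  (PySem.List.slice filtered (some (cut + 1)) none).filter
    (fun msg => !(msg.1 == "Self" || msg.1 == "Time"))

-- ===== PRECONDITION & SPEC =====
def Spec_new_msg_get_plus (chat_records : List (String × String)) (out : List (String × String)) : Prop := out = new_msg_get_plus_alt chat_records
instance (chat_records : List (String × String)) (out : List (String × String)) : Decidable (Spec_new_msg_get_plus chat_records out) := by unfold Spec_new_msg_get_plus; infer_instance

-- ===== CLAIM (what is proved, stated in full; the proofs are below) =====
def Claim_equal_new_msg_get_plus : Prop := ∀ (chat_records : List (String × String)), Dom_new_msg_get_plus chat_records → Spec_new_msg_get_plus chat_records (new_msg_get_plus chat_records)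

-- ===== LEMMAS AND PROOFS =====

-- the last-index-of-p loop of A (shared shape of its three loops)
def pvLastO (p : String × String → Bool) (L : List (String × String)) : Option Int :=
  (PySem.List.enumerate L 0).foldl (fun acc q => if p q.2 then some q.1 else acc) none

-- the cut loop of B
def pvCutF (L : List (String × String)) : Int :=
  (PySem.List.enumerate L 0).foldl
    (fun c q => if q.2.1 == "Self" || q.2.1 == "Time" then q.1 else c) (-1)

-- A after its first filter
def pvAcore (L : List (String × String)) : List (String × String) :=
  if L.any (fun msg => msg.1 == "Self") then
    match pvLastO (fun msg => msg.1 == "Self") L with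
    | none => []
    | some i =>
      let post_self := PySem.List.slice L (some (i + 1)) none
      match pvLastO (fun msg => msg.1 == "Time") post_self with
      | some t =>
        (PySem.List.slice post_self (some (t + 1)) none).filter
          (fun msg => !(msg.1 == "Self" || msg.1 == "Time"))
      | none => post_self
  else
    match pvLastO (fun msg => msg.1 == "Time") L with
    | some t =>
      (PySem.List.slice L (some (t + 1)) none).filter
        (fun msg => !(msg.1 == "Self" || msg.1 == "Time"))
    | none => L

-- B after its first filter
def pvBcore (L : List (String × String)) : List (String × String) :=
  (PySem.List.slice L (some (pvCutF L + 1)) none).filter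
    (fun msg => !(msg.1 == "Self" || msg.1 == "Time"))

lemma pvLastO_append (p : String × String → Bool) (L : List (String × String)) (x : String × String) :
    pvLastO p (L ++ [x]) = if p x then some (L.length : Int) else pvLastO p L := by
  unfold pvLastO
  rw [PySem.List.enumerate_append, List.foldl_append]
  simp [PySem.List.enumerate]

lemma pvCutF_append (L : List (String × String)) (x : String × String) :
    pvCutF (L ++ [x]) = if x.1 == "Self" || x.1 == "Time" then (L.length : Int) else pvCutF L := by
  unfold pvCutF
  rw [PySem.List.enumerate_append, List.foldl_append]
  simp [PySem.List.enumerate]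

lemma pvLastO_cases (p : String × String → Bool) (L : List (String × String)) :
    (pvLastO p L = none ∧ L.any p = false) ∨
    (∃ i : Nat, pvLastO p L = some (i : Int) ∧ i < L.length ∧ L.any p = true) := by
  induction L using List.reverseRecOn with
  | nil => left; exact ⟨rfl, rfl⟩
  | append_singleton L x ih =>
    by_cases hx : p x = true
    · right
      exact ⟨L.length, by simp [pvLastO_append, hx], by simp, by simp [hx]⟩
    · rw [pvLastO_append]
      simp only [hx, Bool.false_eq_true, if_false]
      rcases ih with ⟨h1, h2⟩ | ⟨i, h1, h2, h3⟩
      · left; simp [h1, h2, hx]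
      · right; exact ⟨i, h1, by simp; omega, by simp [h3]⟩

lemma pvCutF_bounds (L : List (String × String)) :
    -1 ≤ pvCutF L ∧ pvCutF L < (L.length : Int) := by
  induction L using List.reverseRecOn with
  | nil => constructor <;> simp [pvCutF, PySem.List.enumerate]
  | append_singleton L x ih =>
    rw [pvCutF_append]
    obtain ⟨h1, h2⟩ := ih
    split
    · simp only [List.length_append, List.length_cons, List.length_nil]
      omega
    · simp only [List.length_append, List.length_cons, List.length_nil]
      omega

lemma pvBcore_append_other (L : List (String × String)) (x : String × String)
    (hS : (x.1 == "Self") = false) (hT : (x.1 == "Time") = false) :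
    pvBcore (L ++ [x]) = pvBcore L ++ [x] := by
  unfold pvBcore
  rw [pvCutF_append]
  simp only [hS, hT, Bool.or_false, Bool.false_eq_true, if_false]
  obtain ⟨h1, h2⟩ := pvCutF_bounds L
  rw [PySem.List.slice_from (L ++ [x]) (a := pvCutF L + 1) (by omega),
      PySem.List.slice_from L (a := pvCutF L + 1) (by omega)]
  rw [List.drop_append_of_le_length (by omega)]
  simp [hS, hT]

lemma pvBcore_append_marker (L : List (String × String)) (x : String × String)
    (hx : (x.1 == "Self" || x.1 == "Time") = true) :
    pvBcore (L ++ [x]) = [] := by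
  unfold pvBcore
  rw [pvCutF_append]
  simp only [hx, if_true]
  rw [PySem.List.slice_from (L ++ [x]) (a := (L.length : Int) + 1) (by omega)]
  have : ((L.length : Int) + 1).toNat = L.length + 1 := by omega
  rw [this, List.drop_eq_nil_of_le (by simp)]
  rfl

lemma pvAcore_append_other (L : List (String × String)) (x : String × String)
    (hS : (x.1 == "Self") = false) (hT : (x.1 == "Time") = false) :
    pvAcore (L ++ [x]) = pvAcore L ++ [x] := by
  unfold pvAcore
  simp only [List.any_append, List.any_cons, List.any_nil, hS, hT, Bool.or_false,
             Bool.false_eq_true, pvLastO_append, if_false]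
  by_cases hA : L.any (fun msg => msg.1 == "Self") = true
  · simp only [hA, reduceIte]
    rcases pvLastO_cases (fun msg => msg.1 == "Self") L with ⟨_, h2⟩ | ⟨i, h1, h2, _⟩
    · rw [hA] at h2; cases h2
    · simp only [h1]
      rw [PySem.List.slice_from (L ++ [x]) (a := (i : Int) + 1) (by omega),
          PySem.List.slice_from L (a := (i : Int) + 1) (by omega)]
      have hto : ((i : Int) + 1).toNat = i + 1 := by omega
      rw [hto, List.drop_append_of_le_length (by omega)]
      rw [pvLastO_append]
      simp only [hT, Bool.false_eq_true, if_false]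
      rcases pvLastO_cases (fun msg => msg.1 == "Time") (L.drop (i + 1)) with ⟨h1', _⟩ | ⟨t, h1', h2', _⟩
      · simp only [h1']
      · simp only [h1']
        rw [PySem.List.slice_from (L.drop (i + 1) ++ [x]) (a := (t : Int) + 1) (by omega),
            PySem.List.slice_from (L.drop (i + 1)) (a := (t : Int) + 1) (by omega)]
        have hto2 : ((t : Int) + 1).toNat = t + 1 := by omega
        rw [hto2, List.drop_append_of_le_length (by omega)]
        simp [hS, hT]
  · simp only [hA, Bool.false_eq_true, if_false]
    rcases pvLastO_cases (fun msg => msg.1 == "Time") L with ⟨h1', _⟩ | ⟨t, h1', h2', _⟩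
    · simp only [h1']
    · simp only [h1']
      rw [PySem.List.slice_from (L ++ [x]) (a := (t : Int) + 1) (by omega),
          PySem.List.slice_from L (a := (t : Int) + 1) (by omega)]
      have hto2 : ((t : Int) + 1).toNat = t + 1 := by omega
      rw [hto2, List.drop_append_of_le_length (by omega)]
      simp [hS, hT]

lemma pvAcore_append_self (L : List (String × String)) (x : String × String)
    (hS : (x.1 == "Self") = true) :
    pvAcore (L ++ [x]) = [] := by
  unfold pvAcore
  simp only [List.any_append, List.any_cons, List.any_nil, hS, Bool.or_false, Bool.or_true,
             pvLastO_append, reduceIte]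
  rw [PySem.List.slice_from (L ++ [x]) (a := (L.length : Int) + 1) (by omega)]
  have h1 : ((L.length : Int) + 1).toNat = L.length + 1 := by omega
  rw [h1, List.drop_eq_nil_of_le (by simp)]
  rfl

lemma pvAcore_append_time (L : List (String × String)) (x : String × String)
    (hT : (x.1 == "Time") = true) :
    pvAcore (L ++ [x]) = [] := by
  have hS : (x.1 == "Self") = false := by
    have := of_decide_eq_true hT
    simp [this]
  unfold pvAcore
  simp only [List.any_append, List.any_cons, List.any_nil, hS, hT, Bool.or_false,
             Bool.false_eq_true, pvLastO_append, if_false, reduceIte]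
  by_cases hA : L.any (fun msg => msg.1 == "Self") = true
  · simp only [hA, reduceIte]
    rcases pvLastO_cases (fun msg => msg.1 == "Self") L with ⟨_, h2⟩ | ⟨i, h1, h2, _⟩
    · rw [hA] at h2; cases h2
    · simp only [h1]
      rw [PySem.List.slice_from (L ++ [x]) (a := (i : Int) + 1) (by omega)]
      have hto : ((i : Int) + 1).toNat = i + 1 := by omega
      rw [hto, List.drop_append_of_le_length (by omega)]
      rw [pvLastO_append]
      simp only [hT, reduceIte]
      rw [PySem.List.slice_from (L.drop (i + 1) ++ [x])
            (a := ((L.drop (i + 1)).length : Int) + 1) (by omega)]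
      have h2' : (((L.drop (i + 1)).length : Int) + 1).toNat = (L.drop (i + 1)).length + 1 := by omega
      rw [h2', List.drop_eq_nil_of_le (by simp)]
      rfl
  · simp only [hA, Bool.false_eq_true, if_false]
    rw [PySem.List.slice_from (L ++ [x]) (a := (L.length : Int) + 1) (by omega)]
    have h1 : ((L.length : Int) + 1).toNat = L.length + 1 := by omega
    rw [h1, List.drop_eq_nil_of_le (by simp)]
    rfl

lemma pvCore_eq (L : List (String × String)) : pvAcore L = pvBcore L := by
  induction L using List.reverseRecOn with
  | nil => rfl
  | append_singleton L x ih =>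
    by_cases hS : (x.1 == "Self") = true
    · rw [pvAcore_append_self L x hS, pvBcore_append_marker L x (by simp [hS])]
    · by_cases hT : (x.1 == "Time") = true
      · rw [pvAcore_append_time L x hT, pvBcore_append_marker L x (by simp [hT])]
      · rw [pvAcore_append_other L x (by simpa using hS) (by simpa using hT),
            pvBcore_append_other L x (by simpa using hS) (by simpa using hT), ih]

lemma pvPortA_eq (c : List (String × String)) :
    new_msg_get_plus c = pvAcore (c.filter (fun msg => !(msg.1 == "SYS" || msg.1 == "Recall"))) := rfl

lemma pvPortB_eq (c : List (String × String)) :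
    new_msg_get_plus_alt c = pvBcore (c.filter (fun msg => !(msg.1 == "SYS" || msg.1 == "Recall"))) := rfl

-- ===== VERDICT (by name: the statement is the Claim_ definition above) =====
theorem new_msg_get_plus_spec : Claim_equal_new_msg_get_plus := by
  intro c _
  unfold Spec_new_msg_get_plus
  rw [pvPortA_eq, pvPortB_eq, pvCore_eq]
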